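-- pv_equiv track=rewrite | github.com/kiwidamien/katas | 2022/day23_puzzle.py | propose_move
-- ===== SOURCE A (Python) =====
-- from typing import Dict, List, Tuple, Set
--
-- Location = Tuple[int, int]
--
-- Field = Set[Location]
--
-- _dirs = {
--     'N': [(x, -1) for x in [-1, 0, 1]],
--     'S': [(x, 1) for x in [-1, 0, 1]],
--     'E': [(1, y) for y in [-1, 0, 1]],
--     'W': [(-1,y) for y in [-1, 0, 1]]
-- }
--
-- _step = {
--     'N': (0, -1), 'S': (0, 1), 'E': (1, 0), 'W': (-1, 0)
-- }
--
-- def can_propose_direction(field: Field, location: Location, checks: List[Location]) -> bool: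
--     return all([(location[0] + c[0], location[1]+c[1]) not in field for c in checks])
--
-- def can_move(field, location):
--     dirs = [
--         (x,y) for x in [-1, 0, 1] for y in [-1, 0, 1]
--         if (x,y) != (0,0)
--     ]
--     return not can_propose_direction(field, location, checks=dirs)
--
-- def can_move_compass(field, location, compass):
--     return can_propose_direction(field, location, checks=_dirs[compass])
--
-- def propose_move(field, location, order):
--     if not can_move(field, location):
--         return location
--     for compass in order:
--         if can_move_compass(field, location, compass):
--             step = _step[compass]
--             return (location[0] + step[0], location[1] + step[1])
--     return location
-- ===== SOURCE B (Python) =====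
-- # Bitmask re-implementation: encode the 8 neighbour cells as one integer bitmask,
-- # then decide emptiness and each compass direction by bitwise AND against fixed masks.
--
-- # bit i of the mask corresponds to _BITS[i]
-- _BITS = [(-1, -1), (0, -1), (1, -1), (-1, 0), (1, 0), (-1, 1), (0, 1), (1, 1)]
--
-- # mask of the three cells each compass direction requires to be free
-- _DIRMASK = {'N': 0b00000111, 'S': 0b11100000, 'E': 0b10010100, 'W': 0b00101001}
--
-- _STEP = {'N': (0, -1), 'S': (0, 1), 'E': (1, 0), 'W': (-1, 0)}
--
--
-- def propose_move(field, location, order):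
--     x, y = location
--     mask = 0
--     for i, (dx, dy) in enumerate(_BITS):
--         if (x + dx, y + dy) in field:
--             mask |= 1 << i
--     if mask == 0:
--         return location
--     for compass in order:
--         if mask & _DIRMASK[compass] == 0:
--             sx, sy = _STEP[compass]
--             return (x + sx, y + sy)
--     return location
-- ===== Notes on version B (the rewrite author's own statement) =====
-- stated objective: alternative
-- what changed: B replaces A's per-direction list-membership scans of the field with an 8-bit neighbourhood bitmask built in one pass; emptiness and each compass test become single bitwise-AND operations against fixed constant masks, so the field is consulted only once.
-- outside the precondition, e.g. on propose_move({(0, -1)}, (0, 0), ['S', 'X']): A returns (0, 1), B returns (0, 1)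
import Mathlib
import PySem

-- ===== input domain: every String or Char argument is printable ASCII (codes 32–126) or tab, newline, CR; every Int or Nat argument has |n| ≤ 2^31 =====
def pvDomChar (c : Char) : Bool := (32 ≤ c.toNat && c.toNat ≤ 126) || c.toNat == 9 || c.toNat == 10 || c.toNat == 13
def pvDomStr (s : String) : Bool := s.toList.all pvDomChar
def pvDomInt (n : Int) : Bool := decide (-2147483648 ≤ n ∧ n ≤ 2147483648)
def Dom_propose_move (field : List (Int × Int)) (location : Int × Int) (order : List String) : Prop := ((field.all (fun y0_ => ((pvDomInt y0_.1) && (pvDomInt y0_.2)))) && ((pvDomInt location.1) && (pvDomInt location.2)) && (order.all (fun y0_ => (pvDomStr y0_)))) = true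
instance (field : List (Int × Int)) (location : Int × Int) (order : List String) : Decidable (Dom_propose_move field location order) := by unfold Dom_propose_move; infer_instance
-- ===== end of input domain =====

-- ===== PORT A =====
-- B re-implements A with an 8-bit neighbourhood bitmask built in one pass over the field;
-- each compass test is a bitwise AND against a constant mask (objective: alternative).

def pvDirs (c : String) : List (Int × Int) :=
  if c = "N" then [(-1, -1), (0, -1), (1, -1)]
  else if c = "S" then [(-1, 1), (0, 1), (1, 1)]
  else if c = "E" then [(1, -1), (1, 0), (1, 1)]
  else if c = "W" then [(-1, -1), (-1, 0), (-1, 1)]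
  else []  -- invalid compass: Python raises KeyError; excluded by Pre_propose_move

def pvStep (c : String) : Int × Int :=
  if c = "N" then (0, -1)
  else if c = "S" then (0, 1)
  else if c = "E" then (1, 0)
  else if c = "W" then (-1, 0)
  else (0, 0)  -- unreachable under Pre_propose_move

def can_propose_direction (field : List (Int × Int)) (location : Int × Int)
    (checks : List (Int × Int)) : Bool :=
  checks.all (fun c => !(field.contains (location.1 + c.1, location.2 + c.2)))

-- the comprehension [(x,y) for x in [-1,0,1] for y in [-1,0,1] if (x,y) != (0,0)]
def pvAllDirs : List (Int × Int) :=
  [(-1, -1), (-1, 0), (-1, 1), (0, -1), (0, 1), (1, -1), (1, 0), (1, 1)]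

def can_move (field : List (Int × Int)) (location : Int × Int) : Bool :=
  !(can_propose_direction field location pvAllDirs)

def can_move_compass (field : List (Int × Int)) (location : Int × Int) (compass : String) : Bool :=
  can_propose_direction field location (pvDirs compass)

def propose_move_loop (field : List (Int × Int)) (location : Int × Int) :
    List String → Int × Int
  | [] => location
  | compass :: rest =>
      if can_move_compass field location compass then
        (location.1 + (pvStep compass).1, location.2 + (pvStep compass).2)
      else propose_move_loop field location rest

def propose_move (field : List (Int × Int)) (location : Int × Int) (order : List String) : Int × Int :=
  if !(can_move field location) then location
  else propose_move_loop field location order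

-- ===== PORT B =====
-- bit i of the mask corresponds to pvBits[i]
def pvBits : List (Int × Int) :=
  [(-1, -1), (0, -1), (1, -1), (-1, 0), (1, 0), (-1, 1), (0, 1), (1, 1)]

def pvDirMask (c : String) : Nat :=
  if c = "N" then 7          -- 0b00000111
  else if c = "S" then 224   -- 0b11100000
  else if c = "E" then 148   -- 0b10010100
  else if c = "W" then 41    -- 0b00101001
  else 0  -- invalid compass: Python raises KeyError; excluded by Pre_propose_move

def pvMask (field : List (Int × Int)) (location : Int × Int) : Nat :=
  (PySem.List.enumerate pvBits).foldl
    (fun m p =>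
      if field.contains (location.1 + p.2.1, location.2 + p.2.2)
      then m ||| (1 <<< p.1.toNat) else m) 0

def propose_move_alt_loop (mask : Nat) (location : Int × Int) :
    List String → Int × Int
  | [] => location
  | compass :: rest =>
      if mask &&& pvDirMask compass == 0 then
        (location.1 + (pvStep compass).1, location.2 + (pvStep compass).2)
      else propose_move_alt_loop mask location rest

def propose_move_alt (field : List (Int × Int)) (location : Int × Int) (order : List String) : Int × Int :=
  let mask := pvMask field location
  if mask = 0 then location
  else propose_move_alt_loop mask location order

-- ===== PRECONDITION & SPEC =====
-- Pre_ excludes orders that contain a non-compass string while some neighbour is occupied: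
-- there Python A (and B) may raise KeyError (they return only if a movable valid direction
-- precedes the invalid entry, in which case both return the same value).
def Pre_propose_move (field : List (Int × Int)) (location : Int × Int) (order : List String) : Prop :=
  (∀ d ∈ pvBits, (location.1 + d.1, location.2 + d.2) ∉ field) ∨
  (∀ c ∈ order, c = "N" ∨ c = "S" ∨ c = "E" ∨ c = "W")
instance (field : List (Int × Int)) (location : Int × Int) (order : List String) : Decidable (Pre_propose_move field location order) := by unfold Pre_propose_move; infer_instance

def pvWitness_propose_move : (List (Int × Int)) × (Int × Int) × List String :=
  ([(1, 1)], (0, 0), ["N", "S", "W", "E"])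

def Spec_propose_move (field : List (Int × Int)) (location : Int × Int) (order : List String) (out : Int × Int) : Prop := out = propose_move_alt field location order
instance (field : List (Int × Int)) (location : Int × Int) (order : List String) (out : Int × Int) : Decidable (Spec_propose_move field location order out) := by unfold Spec_propose_move; infer_instance

-- ===== CLAIM (what is proved, stated in full; the proofs are below) =====
def Claim_equal_propose_move : Prop := ∀ (field : List (Int × Int)) (location : Int × Int) (order : List String), Dom_propose_move field location order → Pre_propose_move field location order → Spec_propose_move field location order (propose_move field location order)

-- ===== LEMMAS AND PROOFS =====

-- the mask as an explicit function of the 8 neighbour-occupancy booleans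
def pvMexpr (b0 b1 b2 b3 b4 b5 b6 b7 : Bool) : Nat :=
  let m := if b0 then 0 ||| 1 else 0
  let m := if b1 then m ||| 2 else m
  let m := if b2 then m ||| 4 else m
  let m := if b3 then m ||| 8 else m
  let m := if b4 then m ||| 16 else m
  let m := if b5 then m ||| 32 else m
  let m := if b6 then m ||| 64 else m
  if b7 then m ||| 128 else m

theorem pvMask_eq (field : List (Int × Int)) (location : Int × Int) :
    pvMask field location =
      pvMexpr
        (field.contains (location.1 + -1, location.2 + -1))
        (field.contains (location.1 + 0, location.2 + -1))
        (field.contains (location.1 + 1, location.2 + -1))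
        (field.contains (location.1 + -1, location.2 + 0))
        (field.contains (location.1 + 1, location.2 + 0))
        (field.contains (location.1 + -1, location.2 + 1))
        (field.contains (location.1 + 0, location.2 + 1))
        (field.contains (location.1 + 1, location.2 + 1)) := by
  rfl

theorem pvMexpr_zero (b0 b1 b2 b3 b4 b5 b6 b7 : Bool) :
    decide (pvMexpr b0 b1 b2 b3 b4 b5 b6 b7 = 0) =
      (!b0 && !b1 && !b2 && !b3 && !b4 && !b5 && !b6 && !b7) := by
  revert b0 b1 b2 b3 b4 b5 b6 b7; decide

theorem pvMexpr_N (b0 b1 b2 b3 b4 b5 b6 b7 : Bool) :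
    (pvMexpr b0 b1 b2 b3 b4 b5 b6 b7 &&& 7 == 0) = (!b0 && !b1 && !b2) := by
  revert b0 b1 b2 b3 b4 b5 b6 b7; decide

theorem pvMexpr_S (b0 b1 b2 b3 b4 b5 b6 b7 : Bool) :
    (pvMexpr b0 b1 b2 b3 b4 b5 b6 b7 &&& 224 == 0) = (!b5 && !b6 && !b7) := by
  revert b0 b1 b2 b3 b4 b5 b6 b7; decide

theorem pvMexpr_E (b0 b1 b2 b3 b4 b5 b6 b7 : Bool) :
    (pvMexpr b0 b1 b2 b3 b4 b5 b6 b7 &&& 148 == 0) = (!b2 && !b4 && !b7) := by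
  revert b0 b1 b2 b3 b4 b5 b6 b7; decide

theorem pvMexpr_W (b0 b1 b2 b3 b4 b5 b6 b7 : Bool) :
    (pvMexpr b0 b1 b2 b3 b4 b5 b6 b7 &&& 41 == 0) = (!b0 && !b3 && !b5) := by
  revert b0 b1 b2 b3 b4 b5 b6 b7; decide

theorem pv_compass_eq (field : List (Int × Int)) (location : Int × Int) (c : String) :
    (pvMask field location &&& pvDirMask c == 0) = can_move_compass field location c := by
  rw [pvMask_eq]
  unfold can_move_compass can_propose_direction pvDirs pvDirMask
  split_ifs <;>
    simp only [pvMexpr_N, pvMexpr_S, pvMexpr_E, pvMexpr_W, List.all_cons, List.all_nil,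
      Bool.and_true] <;> simp [Bool.and_assoc]

theorem pv_loop_eq (field : List (Int × Int)) (location : Int × Int) (order : List String) :
    propose_move_alt_loop (pvMask field location) location order =
      propose_move_loop field location order := by
  induction order with
  | nil => rfl
  | cons c rest ih =>
      simp only [propose_move_loop, propose_move_alt_loop, pv_compass_eq, ih]

theorem pv_mask_zero_iff (field : List (Int × Int)) (location : Int × Int) :
    decide (pvMask field location = 0) = !(can_move field location) := by
  rw [pvMask_eq, pvMexpr_zero]
  unfold can_move can_propose_direction pvAllDirs
  simp only [List.all_cons, List.all_nil, Bool.and_true, Bool.not_not]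
  generalize field.contains (location.1 + -1, location.2 + -1) = b0
  generalize field.contains (location.1 + 0, location.2 + -1) = b1
  generalize field.contains (location.1 + 1, location.2 + -1) = b2
  generalize field.contains (location.1 + -1, location.2 + 0) = b3
  generalize field.contains (location.1 + 1, location.2 + 0) = b4
  generalize field.contains (location.1 + -1, location.2 + 1) = b5
  generalize field.contains (location.1 + 0, location.2 + 1) = b6
  generalize field.contains (location.1 + 1, location.2 + 1) = b7
  revert b0 b1 b2 b3 b4 b5 b6 b7; decide

-- ===== VERDICT (by name: the statement is the Claim_ definition above) =====
theorem propose_move_spec : Claim_equal_propose_move := by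
  intro field location order _ _
  unfold Spec_propose_move propose_move propose_move_alt
  have h := pv_mask_zero_iff field location
  by_cases hm : pvMask field location = 0
  · have hc : can_move field location = false := by simpa [hm] using h.symm
    simp [hm, hc]
  · have hc : can_move field location = true := by simpa [hm] using h.symm
    simp only [hc, Bool.not_true, Bool.false_eq_true, if_false, if_neg hm]
    exact (pv_loop_eq field location order).symm
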